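-- pv_equiv track=rewrite | github.com/HAKORADev/telegram-bot | telegram_bot.py | analyze_conversation_patterns
-- ===== SOURCE A (Python) =====
-- def analyze_conversation_patterns(messages):
--     try:
--         if len(messages) < 5:
--             return "No clear patterns yet (short conversation)"
--         roles = [msg["role"] for msg in messages]
--         user_streak = 0
--         max_user_streak = 0
--         for role in roles:
--             if role == "user":
--                 user_streak += 1
--                 max_user_streak = max(max_user_streak, user_streak)
--             else:
--                 user_streak = 0
--         if max_user_streak >= 2:
--             return "Pattern: User sends multiple consecutive messages (may be excited or need urgent help)"
--         else:
--             return "Pattern: Normal alternation between user and assistant"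
--     except:
--         return "Cannot analyze patterns"
-- ===== SOURCE B (Python) =====
-- def analyze_conversation_patterns(messages):
--     try:
--         if len(messages) < 5:
--             return "No clear patterns yet (short conversation)"
--         roles = [msg["role"] for msg in messages]
--         if any(a == "user" and b == "user" for a, b in zip(roles, roles[1:])):
--             return "Pattern: User sends multiple consecutive messages (may be excited or need urgent help)"
--         return "Pattern: Normal alternation between user and assistant"
--     except:
--         return "Cannot analyze patterns"
-- ===== Notes on version B (the rewrite author's own statement) =====
-- stated objective: simpler
-- what changed: Replaces the running user_streak/max_user_streak fold with a direct pairwise existence check over adjacent roles (any(a=='user' and b=='user' for a,b in zip(roles, roles[1:]))).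
import Mathlib
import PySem

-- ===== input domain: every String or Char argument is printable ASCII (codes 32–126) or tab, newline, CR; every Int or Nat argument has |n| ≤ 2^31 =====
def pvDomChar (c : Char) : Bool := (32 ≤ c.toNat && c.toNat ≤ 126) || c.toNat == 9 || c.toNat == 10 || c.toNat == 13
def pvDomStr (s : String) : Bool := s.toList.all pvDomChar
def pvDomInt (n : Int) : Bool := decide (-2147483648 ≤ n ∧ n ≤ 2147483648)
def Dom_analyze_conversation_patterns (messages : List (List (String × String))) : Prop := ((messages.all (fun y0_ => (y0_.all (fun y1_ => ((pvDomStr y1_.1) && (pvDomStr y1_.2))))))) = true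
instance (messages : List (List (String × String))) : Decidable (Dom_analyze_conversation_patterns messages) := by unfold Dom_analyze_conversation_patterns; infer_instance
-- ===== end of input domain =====

-- B replaces A's running user_streak/max_user_streak fold with a pairwise adjacent-roles existence check (objective: simpler).
-- ===== PORT A =====
-- roles = [msg["role"] for msg in messages]: none if some msg raises KeyError (caught by A's bare except)
def pvRolesOf (messages : List (List (String × String))) : Option (List String) :=
  match messages with
  | [] => some []
  | m :: rest =>
    match (PySem.Dict.mk m).get? "role", pvRolesOf rest with
    | some r, some rs => some (r :: rs)
    | _, _ => none

def analyze_conversation_patterns (messages : List (List (String × String))) : String :=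
  if messages.length < 5 then "No clear patterns yet (short conversation)"
  else
    match pvRolesOf messages with
    | none => "Cannot analyze patterns"
    | some roles =>
      let st := roles.foldl (fun (p : Nat × Nat) role =>
        if role = "user" then (p.1 + 1, max p.2 (p.1 + 1)) else (0, p.2)) (0, 0)
      if st.2 ≥ 2 then "Pattern: User sends multiple consecutive messages (may be excited or need urgent help)"
      else "Pattern: Normal alternation between user and assistant"

-- ===== PORT B =====
-- any(a == "user" and b == "user" for a, b in zip(roles, roles[1:]))
def pvHasUserPair : List String → Bool
  | a :: b :: t => (a = "user" && b = "user") || pvHasUserPair (b :: t)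
  | _ => false

def analyze_conversation_patterns_alt (messages : List (List (String × String))) : String :=
  if messages.length < 5 then "No clear patterns yet (short conversation)"
  else
    match pvRolesOf messages with
    | none => "Cannot analyze patterns"
    | some roles =>
      if pvHasUserPair roles then "Pattern: User sends multiple consecutive messages (may be excited or need urgent help)"
      else "Pattern: Normal alternation between user and assistant"

-- ===== PRECONDITION & SPEC =====
def Spec_analyze_conversation_patterns (messages : List (List (String × String))) (out : String) : Prop := out = analyze_conversation_patterns_alt messages
instance (messages : List (List (String × String))) (out : String) : Decidable (Spec_analyze_conversation_patterns messages out) := by unfold Spec_analyze_conversation_patterns; infer_instance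

-- ===== CLAIM (what is proved, stated in full; the proofs are below) =====
def Claim_equal_analyze_conversation_patterns : Prop := ∀ (messages : List (List (String × String))), Dom_analyze_conversation_patterns messages → Spec_analyze_conversation_patterns messages (analyze_conversation_patterns messages)

-- ===== LEMMAS AND PROOFS =====
-- invariant for A's fold: final max ≥ 2 iff carried max ≥ 2, or a live streak meets a leading "user", or an adjacent user pair exists
theorem pv_fold_inv (roles : List String) : ∀ s m : Nat,
    (decide (2 ≤ (roles.foldl (fun (p : Nat × Nat) role =>
        if role = "user" then (p.1 + 1, max p.2 (p.1 + 1)) else (0, p.2)) (s, m)).2)) =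
    (decide (2 ≤ m) || (decide (1 ≤ s) && decide (roles.head? = some "user")) || pvHasUserPair roles) := by
  induction roles with
  | nil => simp [pvHasUserPair]
  | cons r t ih =>
    intro s m
    by_cases hr : r = "user"
    · subst hr
      simp only [List.foldl_cons, ih]
      cases t with
      | nil => simp [pvHasUserPair]
      | cons b t' =>
        by_cases hb : b = "user" <;> simp [pvHasUserPair, hb]
    · simp only [List.foldl_cons, if_neg hr, ih]
      cases t with
      | nil => simp [pvHasUserPair, hr]
      | cons b t' => simp [pvHasUserPair, hr]

-- ===== VERDICT (by name: the statement is the Claim_ definition above) =====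
theorem analyze_conversation_patterns_spec : Claim_equal_analyze_conversation_patterns := by
  intro messages _
  unfold Spec_analyze_conversation_patterns analyze_conversation_patterns analyze_conversation_patterns_alt
  split
  · rfl
  · cases h : pvRolesOf messages with
    | none => rfl
    | some roles =>
      have := pv_fold_inv roles 0 0
      simp at this
      by_cases hp : pvHasUserPair roles = true <;> simp [hp] at this <;> simp [hp, this]
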